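-- pv_equiv track=rewrite | github.com/pengyang486868/PY-read-Document | pdfapi/readpdf.py | pdflinelen
-- ===== SOURCE A (Python) =====
-- from collections import Counter
--
-- def pdflinelen(arr, lenrange=6, minlen=10):
--     cntor = Counter(arr)
--     for i in range(minlen):
--         if i in cntor:
--             del cntor[i]  # delete very short lines
--
--     key = cntor.keys()
--     tmax = max(key)
--     tmin = min(key)
--
--     # exit: but practically not possible
--     if tmax - tmin < lenrange:
--         return tmin, tmax
--
--     maxcount = 0
--     for i in range(lenrange):
--         maxcount += cntor[tmin + i]
--
--     min_result = tmin
--     lastcount = maxcount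
--     for c in range(tmin + 1, tmax - lenrange + 2):
--         curcount = lastcount - cntor[c - 1] + cntor[c + lenrange - 1]
--         if curcount > maxcount:
--             maxcount = curcount
--             min_result = c
--         lastcount = curcount
--
--     return min_result, min_result + lenrange - 1
-- ===== SOURCE B (Python) =====
-- from collections import Counter
--
--
-- def pdflinelen(arr, lenrange=6, minlen=10):
--     cntor = Counter(arr)
--     for i in range(minlen):
--         if i in cntor:
--             del cntor[i]  # delete very short lines
--
--     key = cntor.keys()
--     tmax = max(key)
--     tmin = min(key)
--
--     if tmax - tmin < lenrange:
--         return tmin, tmax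
--
--     # prefix sums of the counts over the length axis tmin..tmax;
--     # pref[j] = number of lines with length in [tmin, tmin + j)
--     L = tmax - tmin + 1
--     pref = [0]
--     run = 0
--     for v in range(tmin, tmax + 1):
--         run += cntor[v]
--         pref.append(run)
--
--     def win(c):
--         lo = min(max(c - tmin, 0), L)
--         hi = min(max(c - tmin + lenrange, 0), L)
--         return pref[hi] - pref[lo]
--
--     best = tmin
--     bestcount = win(tmin)
--     for c in range(tmin + 1, tmax - lenrange + 2):
--         w = win(c)
--         if w > bestcount:
--             bestcount = w
--             best = c
--     return best, best + lenrange - 1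
-- ===== Notes on version B (the rewrite author's own statement) =====
-- stated objective: alternative
-- what changed: Replaces A's incremental sliding-window update (curcount = lastcount - cntor[c-1] + cntor[c+lenrange-1]) by a separately built prefix-sum table over the length axis, with each window count computed independently as a difference of two clamped prefix sums.
import Mathlib
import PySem

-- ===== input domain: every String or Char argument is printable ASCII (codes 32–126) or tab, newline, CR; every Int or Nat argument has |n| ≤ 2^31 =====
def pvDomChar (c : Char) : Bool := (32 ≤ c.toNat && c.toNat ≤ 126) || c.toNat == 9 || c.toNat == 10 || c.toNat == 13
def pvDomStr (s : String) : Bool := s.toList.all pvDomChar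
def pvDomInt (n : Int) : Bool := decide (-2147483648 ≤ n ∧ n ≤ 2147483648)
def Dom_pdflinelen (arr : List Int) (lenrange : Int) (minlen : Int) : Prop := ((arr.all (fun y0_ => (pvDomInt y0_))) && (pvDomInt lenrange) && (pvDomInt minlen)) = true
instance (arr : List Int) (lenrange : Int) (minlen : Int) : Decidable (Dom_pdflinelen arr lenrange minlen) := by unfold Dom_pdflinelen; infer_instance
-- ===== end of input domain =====

-- B replaces A's incremental sliding-window update by an explicit prefix-sum table,
-- computing each window count as a difference of two clamped prefix sums (objective: alternative).


-- ===== PORT A =====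
-- shared by both ports (identical code lines in Source A and Source B): Counter(arr) then
-- 'for i in range(minlen): if i in cntor: del cntor[i]'
def pvCntor (arr : List Int) (minlen : Int) : PySem.Dict Int Int :=
  (PySem.List.pyRange 0 minlen 1).foldl
    (fun d i => if d.contains i then d.erase i else d)
    (PySem.Dict.counter arr)

-- the body of A's sliding-window loop: state (maxcount, min_result, lastcount)
def pvStepA (f : Int → Int) (lenrange : Int) (st : Int × Int × Int) (c : Int) : Int × Int × Int :=
  let curcount := st.2.2 - f (c - 1) + f (c + lenrange - 1)
  if curcount > st.1 then (curcount, c, curcount) else (st.1, st.2.1, curcount)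

-- everything A does after computing tmax and tmin
def pvBodyA (cntor : PySem.Dict Int Int) (lenrange tmax tmin : Int) : Int × Int :=
  if tmax - tmin < lenrange then (tmin, tmax)
  else
    let maxcount := (PySem.List.pyRange 0 lenrange 1).foldl
      (fun s i => s + cntor.getD (tmin + i) 0) 0
    let fin := (PySem.List.pyRange (tmin + 1) (tmax - lenrange + 2) 1).foldl
      (pvStepA (fun v => cntor.getD v 0) lenrange) (maxcount, tmin, maxcount)
    (fin.2.1, fin.2.1 + lenrange - 1)

def pdflinelen (arr : List Int) (lenrange : Int) (minlen : Int) : Int × Int :=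
  let cntor := pvCntor arr minlen
  let key := cntor.keys
  match PySem.List.max? key (fun y => y), PySem.List.min? key (fun y => y) with
  | some tmax, some tmin => pvBodyA cntor lenrange tmax tmin
  | _, _ => (0, 0)   -- Python raises ValueError (max of empty sequence) here; excluded by Pre_

-- ===== PORT B =====
-- B's copy of the identical Counter construction + short-line deletion lines of Source B
def pvCntorAlt (arr : List Int) (minlen : Int) : PySem.Dict Int Int :=
  (PySem.List.pyRange 0 minlen 1).foldl
    (fun d i => if d.contains i then d.erase i else d)
    (PySem.Dict.counter arr)

-- Source B's prefix-sum list: pref[j] = number of lines with length in [tmin, tmin + j)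
def pvPref (cntor : PySem.Dict Int Int) (tmin tmax : Int) : List Int :=
  ((PySem.List.pyRange tmin (tmax + 1) 1).foldl
    (fun (st : List Int × Int) v => (st.1 ++ [st.2 + cntor.getD v 0], st.2 + cntor.getD v 0))
    ([0], 0)).1

-- Source B's win(c): pref[hi] - pref[lo]; the clamped index is always in range, so the total pyGetD form is exact
def pvWin (pref : List Int) (lenrange tmin tmax c : Int) : Int :=
  PySem.List.pyGetD pref (min (max (c - tmin + lenrange) 0) (tmax - tmin + 1)) 0
    - PySem.List.pyGetD pref (min (max (c - tmin) 0) (tmax - tmin + 1)) 0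

-- the body of B's maximum-search loop: state (best, bestcount)
def pvStepB (win : Int → Int) (st : Int × Int) (c : Int) : Int × Int :=
  let w := win c
  if w > st.2 then (c, w) else st

-- everything B does after computing tmax and tmin
def pvBodyB (cntor : PySem.Dict Int Int) (lenrange tmax tmin : Int) : Int × Int :=
  if tmax - tmin < lenrange then (tmin, tmax)
  else
    let pref := pvPref cntor tmin tmax
    let fin := (PySem.List.pyRange (tmin + 1) (tmax - lenrange + 2) 1).foldl
      (pvStepB (pvWin pref lenrange tmin tmax)) (tmin, pvWin pref lenrange tmin tmax tmin)
    (fin.1, fin.1 + lenrange - 1)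

def pdflinelen_alt (arr : List Int) (lenrange : Int) (minlen : Int) : Int × Int :=
  let cntor := pvCntorAlt arr minlen
  let key := cntor.keys
  match PySem.List.max? key (fun y => y) with
  | some tmax =>
    match PySem.List.min? key (fun y => y) with
    | some tmin => pvBodyB cntor lenrange tmax tmin
    | none => (0, 0)   -- Python raises ValueError (min of empty sequence) here; excluded by Pre_
  | none => (0, 0)   -- Python raises ValueError (max of empty sequence) here; excluded by Pre_

-- ===== PRECONDITION & SPEC =====
-- Pre_ excludes exactly the inputs where every element of arr lies in [0, minlen): there the
-- short-line deletion empties the Counter and Python's max(key) raises ValueError (in A and in B).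
def Pre_pdflinelen (arr : List Int) (lenrange : Int) (minlen : Int) : Prop :=
  ∃ x ∈ arr, x < 0 ∨ minlen ≤ x
instance (arr : List Int) (lenrange : Int) (minlen : Int) : Decidable (Pre_pdflinelen arr lenrange minlen) := by unfold Pre_pdflinelen; infer_instance

def pvWitness_pdflinelen : List Int × Int × Int := ([12, 12, 13, 15, 40, 41, 3], 6, 10)

def Spec_pdflinelen (arr : List Int) (lenrange : Int) (minlen : Int) (out : Int × Int) : Prop := out = pdflinelen_alt arr lenrange minlen
instance (arr : List Int) (lenrange : Int) (minlen : Int) (out : Int × Int) : Decidable (Spec_pdflinelen arr lenrange minlen out) := by unfold Spec_pdflinelen; infer_instance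

-- ===== CLAIM (what is proved, stated in full; the proofs are below) =====
def Claim_equal_pdflinelen : Prop := ∀ (arr : List Int) (lenrange : Int) (minlen : Int), Dom_pdflinelen arr lenrange minlen → Pre_pdflinelen arr lenrange minlen → Spec_pdflinelen arr lenrange minlen (pdflinelen arr lenrange minlen)

-- ===== LEMMAS AND PROOFS =====

-- the two ports transcribe the same Counter-building Python lines
theorem pvCntorAlt_eq (arr : List Int) (minlen : Int) :
    pvCntorAlt arr minlen = pvCntor arr minlen := rfl

-- Dict facts not in the PySem book: get? after erase
theorem pv_get?_erase_self (d : PySem.Dict Int Int) (k : Int) : (d.erase k).get? k = none := by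
  simp only [PySem.Dict.get?, PySem.Dict.erase, List.find?_filter, Bool.not_eq_eq_eq_not,
    Bool.not_true, beq_eq_false_iff_ne, ne_eq, beq_iff_eq, not_and_self, decide_false,
    Option.map_eq_none_iff, List.find?_eq_none, Bool.false_eq_true, not_false_eq_true, implies_true]

theorem pv_get?_erase_ne (d : PySem.Dict Int Int) (k k' : Int) (h : k' ≠ k) :
    (d.erase k).get? k' = d.get? k' := by
  simp only [PySem.Dict.get?, PySem.Dict.erase, List.find?_filter]
  have : (fun (a : Int × Int) => decide ((!a.1 == k) = true ∧ (a.1 == k') = true))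
      = (fun (p : Int × Int) => p.1 == k') := by
    funext a; by_cases ha : a.1 = k' <;> simp [ha, h]
  rw [this]

theorem pv_getD_eq_get? (d : PySem.Dict Int Int) (k : Int) : d.getD k 0 = (d.get? k).getD 0 := rfl

-- the deletion loop, characterised pointwise
theorem pv_erase_loop_get? (l : List Int) : ∀ (d : PySem.Dict Int Int) (v : Int),
    (l.foldl (fun d i => if d.contains i then d.erase i else d) d).get? v
      = if v ∈ l then none else d.get? v := by
  induction l with
  | nil => intro d v; simp
  | cons i t ih =>
    intro d v
    simp only [List.foldl_cons]
    rw [ih]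
    by_cases hvt : v ∈ t
    · simp [hvt]
    · by_cases hvi : v = i
      · subst hvi
        by_cases hc : d.contains v
        · simp [hvt, hc, pv_get?_erase_self]
        · have hc' : d.contains v = false := eq_false_of_ne_true hc
          have hnone : d.get? v = none := by
            have h2 := PySem.Dict.contains_eq_isSome_get? d v
            rw [hc'] at h2
            exact Option.not_isSome_iff_eq_none.mp (by rw [← h2]; simp)
          simp [hvt, hc', hnone]
      · have hm : v ∉ i :: t := by simp [hvi, hvt]
        rw [if_neg hvt, if_neg hm]
        split
        · exact pv_get?_erase_ne d i v hvi
        · rfl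

theorem pvCntor_get? (arr : List Int) (minlen v : Int) :
    (pvCntor arr minlen).get? v
      = if 0 ≤ v ∧ v < minlen then none else (PySem.Dict.counter arr).get? v := by
  unfold pvCntor
  rw [pv_erase_loop_get?]
  simp [PySem.List.mem_pyRange_one]

theorem pvCntor_mem_keys (arr : List Int) (minlen v : Int) :
    v ∈ (pvCntor arr minlen).keys ↔ v ∈ arr ∧ (v < 0 ∨ minlen ≤ v) := by
  rw [← not_iff_not]
  rw [← PySem.Dict.get?_eq_none_iff_not_mem_keys, pvCntor_get?]
  have hcc : (PySem.Dict.counter arr).get? v = none ↔ v ∉ arr := by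
    rw [PySem.Dict.get?_eq_none_iff_not_mem_keys, PySem.Dict.keys_counter]
    simp [PySem.Set.mem_ofList]
  by_cases h : 0 ≤ v ∧ v < minlen
  · simp [h]
  · simp [h, hcc]

-- sums over integer ranges
def pvS (f : Int → Int) (a b : Int) : Int := ((PySem.List.pyRange a b 1).map f).sum

theorem pvS_nil (f : Int → Int) {a b : Int} (h : b ≤ a) : pvS f a b = 0 := by
  simp [pvS, PySem.List.pyRange_one_eq_nil h]

theorem pvS_cons (f : Int → Int) {a b : Int} (h : a < b) : pvS f a b = f a + pvS f (a + 1) b := by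
  simp [pvS, PySem.List.pyRange_one_cons h]

theorem pvS_snoc (f : Int → Int) {a b : Int} (h : a ≤ b) : pvS f a (b + 1) = pvS f a b + f b := by
  rw [pvS, PySem.List.pyRange_one_succ_right h]
  simp [pvS]

-- the prefix-sum building loop
def pvScan (f : Int → Int) : List Int → Int → List Int
  | [], _ => []
  | v :: t, r => (r + f v) :: pvScan f t (r + f v)

theorem pv_build (f : Int → Int) (l : List Int) : ∀ (acc : List Int) (run : Int),
    l.foldl (fun (st : List Int × Int) v => (st.1 ++ [st.2 + f v], st.2 + f v)) (acc, run)
      = (acc ++ pvScan f l run, run + (l.map f).sum) := by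
  induction l with
  | nil => intro acc run; simp [pvScan]
  | cons v t ih => intro acc run; simp [pvScan, ih, add_assoc]

theorem pvScan_get (f : Int → Int) : ∀ (j : Nat) (a b r : Int), (j : Int) < b - a →
    (pvScan f (PySem.List.pyRange a b 1) r)[j]? = some (r + pvS f a (a + j + 1)) := by
  intro j
  induction j with
  | zero =>
    intro a b r h
    rw [PySem.List.pyRange_one_cons (by omega)]
    simp only [pvScan, List.getElem?_cons_zero, Nat.cast_zero, add_zero]
    rw [pvS_cons f (by omega : a < a + 1), pvS_nil f (le_refl (a + 1))]
    ring_nf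
  | succ k ih =>
    intro a b r h
    rw [PySem.List.pyRange_one_cons (by omega)]
    simp only [pvScan, List.getElem?_cons_succ]
    rw [ih (a + 1) b (r + f a) (by push_cast at h ⊢; omega)]
    rw [show pvS f a (a + ((k + 1 : Nat) : Int) + 1) = f a + pvS f (a + 1) (a + 1 + (k : Nat) + 1) by
      rw [pvS_cons f (by push_cast; omega)]; congr 2; push_cast; ring]
    congr 1; ring

-- the shifted initial-window sum
theorem pv_shift (f : Int → Int) (t : Int) : ∀ (n : Nat) (a : Int),
    ((PySem.List.pyRange a (a + n) 1).map (fun i => f (t + i))).sum = pvS f (t + a) (t + a + n) := by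
  intro n
  induction n with
  | zero =>
    intro a
    simp only [Nat.cast_zero, add_zero]
    rw [PySem.List.pyRange_one_eq_nil (le_refl a), pvS_nil f (le_refl (t + a))]
    simp
  | succ k ih =>
    intro a
    rw [PySem.List.pyRange_one_cons (by push_cast; omega)]
    simp only [List.map_cons, List.sum_cons]
    rw [show a + ((k + 1 : Nat) : Int) = (a + 1) + (k : Nat) by push_cast; ring, ih (a + 1)]
    conv_rhs => rw [pvS_cons f (by push_cast; omega : t + a < t + a + ((k + 1 : Nat) : Int))]
    congr 1
    congr 1
    · ring
    · push_cast; ring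

theorem pv_shift' (f : Int → Int) (t a b : Int) (h : a ≤ b) :
    ((PySem.List.pyRange a b 1).map (fun i => f (t + i))).sum = pvS f (t + a) (t + b) := by
  obtain ⟨n, hn⟩ : ∃ n : Nat, b = a + n := ⟨(b - a).toNat, by omega⟩
  subst hn
  rw [pv_shift f t n a]
  congr 1
  ring

-- the two scan loops compute the same best window
theorem pv_loop (f w : Int → Int) (lenrange : Int)
    (hw : ∀ c : Int, w c = w (c - 1) - f (c - 1) + f (c + lenrange - 1)) :
    ∀ (n : Nat) (a m r : Int),
      (PySem.List.pyRange a (a + n) 1).foldl (pvStepB w) (r, m)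
        = (((PySem.List.pyRange a (a + n) 1).foldl (pvStepA f lenrange) (m, r, w (a - 1))).2.1,
           ((PySem.List.pyRange a (a + n) 1).foldl (pvStepA f lenrange) (m, r, w (a - 1))).1) := by
  intro n
  induction n with
  | zero =>
    intro a m r
    simp only [Nat.cast_zero, add_zero]
    rw [PySem.List.pyRange_one_eq_nil (le_refl a)]
    simp
  | succ k ih =>
    intro a m r
    rw [PySem.List.pyRange_one_cons (by push_cast; omega)]
    simp only [List.foldl_cons]
    have hstepA : pvStepA f lenrange (m, r, w (a - 1)) a
        = if w a > m then (w a, a, w a) else (m, r, w a) := by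
      simp only [pvStepA]
      rw [← hw a]
    have hstepB : pvStepB w (r, m) a = if w a > m then (a, w a) else (r, m) := by
      simp only [pvStepB]
    rw [hstepA, hstepB]
    have hrange : a + ((k + 1 : Nat) : Int) = (a + 1) + (k : Nat) := by push_cast; ring
    rw [hrange]
    have ha1 : a + 1 - 1 = a := by ring
    by_cases hgt : w a > m
    · rw [if_pos hgt, if_pos hgt]
      have := ih (a + 1) (w a) a
      rw [ha1] at this
      exact this
    · rw [if_neg hgt, if_neg hgt]
      have := ih (a + 1) m r
      rw [ha1] at this
      exact this

theorem pv_loop' (f w : Int → Int) (lenrange : Int) (a b : Int) (hab : a ≤ b)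
    (hw : ∀ c : Int, w c = w (c - 1) - f (c - 1) + f (c + lenrange - 1)) :
    (PySem.List.pyRange a b 1).foldl (pvStepB w) (a - 1, w (a - 1))
      = (((PySem.List.pyRange a b 1).foldl (pvStepA f lenrange) (w (a - 1), a - 1, w (a - 1))).2.1,
         ((PySem.List.pyRange a b 1).foldl (pvStepA f lenrange) (w (a - 1), a - 1, w (a - 1))).1) := by
  obtain ⟨n, hn⟩ : ∃ n : Nat, b = a + n := ⟨(b - a).toNat, by omega⟩
  subst hn
  exact pv_loop f w lenrange hw n a (w (a - 1)) (a - 1)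

-- the prefix list is [0] followed by the running sums
theorem pvPref_eq (cnt : PySem.Dict Int Int) (tmin tmax : Int) :
    pvPref cnt tmin tmax
      = 0 :: pvScan (fun v => cnt.getD v 0) (PySem.List.pyRange tmin (tmax + 1) 1) 0 := by
  unfold pvPref
  rw [pv_build (fun v => cnt.getD v 0) (PySem.List.pyRange tmin (tmax + 1) 1) [0] 0]
  simp

-- reading the prefix list at an in-range index
theorem pvPref_get (cnt : PySem.Dict Int Int) (tmin tmax : Int) (j : Int)
    (h0 : 0 ≤ j) (h1 : j ≤ tmax - tmin + 1) :
    PySem.List.pyGetD (pvPref cnt tmin tmax) j 0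
      = pvS (fun v => cnt.getD v 0) tmin (tmin + j) := by
  rw [pvPref_eq]
  rw [show j = ((j.toNat : Nat) : Int) from (Int.toNat_of_nonneg h0).symm]
  rw [PySem.List.pyGetD_natCast]
  cases hn : j.toNat with
  | zero =>
    simp only [List.getD_cons_zero, Nat.cast_zero, add_zero]
    rw [pvS_nil (fun v => cnt.getD v 0) (le_refl tmin)]
  | succ k =>
    rw [List.getD_eq_getElem?_getD, List.getElem?_cons_succ]
    rw [pvScan_get (fun v => cnt.getD v 0) k tmin (tmax + 1) 0 (by omega)]
    simp only [Option.getD_some, zero_add]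
    congr 1
    push_cast
    ring

-- win(c) as a difference of clamped range sums
theorem pvWin_spec (cnt : PySem.Dict Int Int) (lenrange tmin tmax : Int) (htm : tmin ≤ tmax)
    (c : Int) :
    pvWin (pvPref cnt tmin tmax) lenrange tmin tmax c
      = pvS (fun v => cnt.getD v 0) tmin (tmin + min (max (c - tmin + lenrange) 0) (tmax - tmin + 1))
        - pvS (fun v => cnt.getD v 0) tmin (tmin + min (max (c - tmin) 0) (tmax - tmin + 1)) := by
  unfold pvWin
  rw [pvPref_get cnt tmin tmax _ (by omega) (by omega),
      pvPref_get cnt tmin tmax _ (by omega) (by omega)]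

-- stepping the clamped prefix sum: counts vanish outside [tmin, tmax]
theorem pvPext_step (cnt : PySem.Dict Int Int) (tmin tmax : Int) (htm : tmin ≤ tmax)
    (hF0 : ∀ v : Int, v < tmin ∨ tmax < v → cnt.getD v 0 = 0) (j : Int) :
    pvS (fun v => cnt.getD v 0) tmin (tmin + min (max j 0) (tmax - tmin + 1))
      - pvS (fun v => cnt.getD v 0) tmin (tmin + min (max (j - 1) 0) (tmax - tmin + 1))
      = cnt.getD (tmin + j - 1) 0 := by
  by_cases h1 : j ≤ 0
  · rw [show min (max j 0) (tmax - tmin + 1) = 0 by omega,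
        show min (max (j - 1) 0) (tmax - tmin + 1) = 0 by omega]
    rw [hF0 (tmin + j - 1) (Or.inl (by omega))]
    ring
  · by_cases h2 : tmax - tmin + 2 ≤ j
    · rw [show min (max j 0) (tmax - tmin + 1) = tmax - tmin + 1 by omega,
          show min (max (j - 1) 0) (tmax - tmin + 1) = tmax - tmin + 1 by omega]
      rw [hF0 (tmin + j - 1) (Or.inr (by omega))]
      ring
    · rw [show min (max j 0) (tmax - tmin + 1) = j by omega,
          show min (max (j - 1) 0) (tmax - tmin + 1) = j - 1 by omega]
      rw [show tmin + j = (tmin + (j - 1)) + 1 by ring,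
          pvS_snoc (fun v => cnt.getD v 0) (by omega : tmin ≤ tmin + (j - 1))]
      rw [show tmin + (j - 1) = tmin + j - 1 by ring]
      ring_nf

-- the sliding-window recurrence for win
theorem pvWin_step (cnt : PySem.Dict Int Int) (lenrange tmin tmax : Int) (htm : tmin ≤ tmax)
    (hF0 : ∀ v : Int, v < tmin ∨ tmax < v → cnt.getD v 0 = 0) (c : Int) :
    pvWin (pvPref cnt tmin tmax) lenrange tmin tmax c
      = pvWin (pvPref cnt tmin tmax) lenrange tmin tmax (c - 1) - cnt.getD (c - 1) 0 + cnt.getD (c + lenrange - 1) 0 := by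
  rw [pvWin_spec cnt lenrange tmin tmax htm c, pvWin_spec cnt lenrange tmin tmax htm (c - 1)]
  rw [show c - 1 - tmin + lenrange = (c - tmin + lenrange) - 1 by ring,
      show c - 1 - tmin = (c - tmin) - 1 by ring]
  have s1 := pvPext_step cnt tmin tmax htm hF0 (c - tmin + lenrange)
  have s2 := pvPext_step cnt tmin tmax htm hF0 (c - tmin)
  rw [show tmin + (c - tmin + lenrange) - 1 = c + lenrange - 1 by ring] at s1
  rw [show tmin + (c - tmin) - 1 = c - 1 by ring] at s2
  linarith

-- the initial window: win(tmin) equals A's first maxcount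
theorem pvWin_init (cnt : PySem.Dict Int Int) (lenrange tmin tmax : Int) (htm : tmin ≤ tmax)
    (hlt : ¬ tmax - tmin < lenrange) :
    pvWin (pvPref cnt tmin tmax) lenrange tmin tmax tmin
      = (PySem.List.pyRange 0 lenrange 1).foldl (fun s i => s + cnt.getD (tmin + i) 0) 0 := by
  rw [pvWin_spec cnt lenrange tmin tmax htm tmin]
  rw [show tmin - tmin + lenrange = lenrange by ring, show tmin - tmin = (0 : Int) by ring]
  rw [show min (max (0 : Int) 0) (tmax - tmin + 1) = 0 by omega]
  rw [show tmin + (0 : Int) = tmin by ring, pvS_nil (fun v => cnt.getD v 0) (le_refl tmin), sub_zero]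
  rw [PySem.List.foldl_add]
  rw [zero_add]
  by_cases hl : lenrange ≤ 0
  · rw [PySem.List.pyRange_one_eq_nil hl]
    rw [show min (max lenrange 0) (tmax - tmin + 1) = 0 by omega]
    rw [show tmin + (0 : Int) = tmin by ring, pvS_nil (fun v => cnt.getD v 0) (le_refl tmin)]
    simp
  · rw [pv_shift' (fun v => cnt.getD v 0) tmin 0 lenrange (by omega)]
    rw [show min (max lenrange 0) (tmax - tmin + 1) = lenrange by omega]
    rw [show tmin + (0 : Int) = tmin by ring]

-- the central branch-equality
theorem pv_branch (cnt : PySem.Dict Int Int) (lenrange tmax tmin : Int)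
    (htm : tmin ≤ tmax)
    (hF0 : ∀ v : Int, v < tmin ∨ tmax < v → cnt.getD v 0 = 0) :
    pvBodyA cnt lenrange tmax tmin = pvBodyB cnt lenrange tmax tmin := by
  by_cases hlt : tmax - tmin < lenrange
  · simp [pvBodyA, pvBodyB, hlt]
  · simp only [pvBodyA, pvBodyB, if_neg hlt]
    have hw := pvWin_step cnt lenrange tmin tmax htm hF0
    have hfin := pv_loop' (fun v => cnt.getD v 0) (pvWin (pvPref cnt tmin tmax) lenrange tmin tmax) lenrange
      (tmin + 1) (tmax - lenrange + 2) (by omega) hw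
    rw [show tmin + 1 - 1 = tmin by ring] at hfin
    rw [← pvWin_init cnt lenrange tmin tmax htm hlt]
    rw [hfin]

-- ===== VERDICT (by name: the statement is the Claim_ definition above) =====
theorem pdflinelen_spec : Claim_equal_pdflinelen := by
  intro arr lenrange minlen _hdom hpre
  show pdflinelen arr lenrange minlen = pdflinelen_alt arr lenrange minlen
  obtain ⟨x, hx, hxout⟩ := hpre
  have hxkeys : x ∈ (pvCntor arr minlen).keys := (pvCntor_mem_keys arr minlen x).mpr ⟨hx, hxout⟩
  have hmaxne : PySem.List.max? (pvCntor arr minlen).keys (fun y => y) ≠ none := fun h => by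
    rw [PySem.List.max?_eq_none_iff] at h
    rw [h] at hxkeys
    simp at hxkeys
  have hminne : PySem.List.min? (pvCntor arr minlen).keys (fun y => y) ≠ none := fun h => by
    rw [PySem.List.min?_eq_none_iff] at h
    rw [h] at hxkeys
    simp at hxkeys
  obtain ⟨tmax, hmax⟩ := Option.ne_none_iff_exists'.mp hmaxne
  obtain ⟨tmin, hmin⟩ := Option.ne_none_iff_exists'.mp hminne
  have htm : tmin ≤ tmax :=
    PySem.List.max?_isMax hmax tmin (PySem.List.min?_mem hmin)
  have hF0 : ∀ v : Int, v < tmin ∨ tmax < v → (pvCntor arr minlen).getD v 0 = 0 := by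
    intro v hv
    rw [pv_getD_eq_get?]
    have hnone : (pvCntor arr minlen).get? v = none := by
      rw [PySem.Dict.get?_eq_none_iff_not_mem_keys]
      intro hmem
      rcases hv with hv | hv
      · exact absurd (PySem.List.min?_isMin hmin v hmem) (by omega)
      · exact absurd (PySem.List.max?_isMax hmax v hmem) (by omega)
    rw [hnone]
    rfl
  simp only [pdflinelen, pdflinelen_alt, pvCntorAlt_eq]
  rw [hmax, hmin]
  exact pv_branch (pvCntor arr minlen) lenrange tmax tmin htm hF0
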